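-- pv_equiv track=rewrite | github.com/ayoubzulfiqar/Leetcode-Medium | FindTheK-thLuckyNumber/find_the_k-th_lucky_number.py | find_kth_lucky_number
-- ===== SOURCE A (Python) =====
-- import collections
--
-- def find_kth_lucky_number(k: int) -> int:
--     if k <= 0:
--         return -1
--
--     q = collections.deque()
--     q.append(4)
--     q.append(7)
--
--     count = 0
--     while q:
--         current_num = q.popleft()
--         count += 1
--
--         if count == k:
--             return current_num
--
--         next_num_4 = current_num * 10 + 4
--         next_num_7 = current_num * 10 + 7
--
--         q.append(next_num_4)
--         q.append(next_num_7)
--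
--     return -1
-- ===== SOURCE B (Python) =====
-- def find_kth_lucky_number(k: int) -> int:
--     # Closed form: the k-th lucky number's digits are the binary digits of k+1
--     # below its top bit, with 0 -> 4 and 1 -> 7; build the number bit by bit.
--     if k <= 0:
--         return -1
--     m = k + 1
--     n = 0
--     p = 1
--     while m > 1:
--         n += (7 if m & 1 else 4) * p
--         p *= 10
--         m >>= 1
--     return n
-- ===== Notes on version B (the rewrite author's own statement) =====
-- stated objective: faster
-- what changed: Replaces the BFS queue that generates all lucky numbers up to the k-th with a closed-form bit decoding of k+1 (each binary digit below the top bit becomes a 4 or 7).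
import Mathlib
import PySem

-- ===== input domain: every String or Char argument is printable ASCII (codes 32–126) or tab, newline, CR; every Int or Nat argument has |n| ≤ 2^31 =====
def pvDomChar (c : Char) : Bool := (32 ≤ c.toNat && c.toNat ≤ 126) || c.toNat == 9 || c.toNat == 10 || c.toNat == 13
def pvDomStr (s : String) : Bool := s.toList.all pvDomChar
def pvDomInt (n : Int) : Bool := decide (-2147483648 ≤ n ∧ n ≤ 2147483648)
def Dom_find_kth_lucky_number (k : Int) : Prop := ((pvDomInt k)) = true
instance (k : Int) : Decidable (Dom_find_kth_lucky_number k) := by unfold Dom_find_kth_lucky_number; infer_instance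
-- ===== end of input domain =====

-- B replaces A's breadth-first queue generation of all lucky numbers up to the
-- k-th with a direct O(log k) bit decoding of k+1 (bit 0 -> digit 4, bit 1 -> digit 7).


-- ===== PORT A =====
-- A's BFS loop: the queue pops its head, counts it, and appends head*10+4 and
-- head*10+7.  Each iteration increases count by 1 and returns when count = k, so
-- the loop runs exactly k times; fuel = k.toNat only makes that recursion total.
def pvLoopA (k : Int) : Nat → List Int → Int → Int
  | 0, _, _ => -1
  | _ + 1, [], _ => -1
  | fuel + 1, current :: rest, count =>
      if count + 1 = k then current
      else pvLoopA k fuel (rest ++ [current * 10 + 4, current * 10 + 7]) (count + 1)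

def find_kth_lucky_number (k : Int) : Int :=
  if k ≤ 0 then -1
  else pvLoopA k k.toNat [4, 7] 0

-- ===== PORT B =====
-- B's loop: while m > 1, add (7 if m odd else 4) * p, p *= 10, m >>= 1.
-- For m ≥ 0, 'm & 1' is m % 2 and 'm >>= 1' is m // 2 (PySem.Int.mod/floordiv);
-- fuel = m.toNat is more than enough iterations and only makes the loop total.
def pvLoopB : Nat → Int → Int → Int → Int
  | 0, _, n, _ => n
  | fuel + 1, m, n, p =>
      if 1 < m then
        pvLoopB fuel (PySem.Int.floordiv m 2)
          (n + (if PySem.Int.mod m 2 = 1 then 7 else 4) * p) (p * 10)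
      else n

def find_kth_lucky_number_alt (k : Int) : Int :=
  if k ≤ 0 then -1
  else pvLoopB (k + 1).toNat (k + 1) 0 1

-- ===== PRECONDITION & SPEC =====
def Spec_find_kth_lucky_number (k : Int) (out : Int) : Prop := out = find_kth_lucky_number_alt k
instance (k : Int) (out : Int) : Decidable (Spec_find_kth_lucky_number k out) := by unfold Spec_find_kth_lucky_number; infer_instance

-- ===== CLAIM (what is proved, stated in full; the proofs are below) =====
def Claim_equal_find_kth_lucky_number : Prop := ∀ (k : Int), Dom_find_kth_lucky_number k → Spec_find_kth_lucky_number k (find_kth_lucky_number k)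

-- ===== LEMMAS AND PROOFS =====

-- The common characterisation: pvL m is the lucky number at heap index m
-- (pvL 2 = 4, pvL 3 = 7, pvL (2m) = pvL m * 10 + 4, pvL (2m+1) = pvL m * 10 + 7).
def pvL (m : Nat) : Int :=
  if m ≤ 1 then 0
  else pvL (m / 2) * 10 + (if m % 2 = 1 then 7 else 4)

lemma pvL_le_one {m : Nat} (h : m ≤ 1) : pvL m = 0 := by
  rw [pvL]; simp [h]

lemma pvL_step {m : Nat} (h : 2 ≤ m) : pvL m = pvL (m / 2) * 10 + (if m % 2 = 1 then 7 else 4) := by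
  rw [pvL]; simp [Nat.not_le.mpr (by omega : 1 < m)]

lemma pvLoopB_eq (fuel : Nat) : ∀ (m : Nat) (n p : Int), m ≤ fuel →
    pvLoopB fuel (m : Int) n p = n + p * pvL m := by
  induction fuel with
  | zero =>
    intro m n p hm
    have : m = 0 := by omega
    subst this
    simp [pvLoopB, pvL_le_one]
  | succ fuel ih =>
    intro m n p hm
    by_cases h2 : 2 ≤ m
    · have hgt : (1 : Int) < (m : Int) := by exact_mod_cast (by omega : 1 < m)
      have hdiv : PySem.Int.floordiv (m : Int) 2 = ((m / 2 : Nat) : Int) :=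
        PySem.Int.floordiv_natCast m 2
      have hmod : PySem.Int.mod (m : Int) 2 = ((m % 2 : Nat) : Int) :=
        PySem.Int.mod_natCast m 2
      have hrec := ih (m / 2) (n + (if PySem.Int.mod (m : Int) 2 = 1 then 7 else 4) * p) (p * 10)
        (by omega)
      rw [pvLoopB]
      simp only [if_pos hgt, hdiv] at *
      rw [hrec, pvL_step h2]
      have : (if PySem.Int.mod (m : Int) 2 = 1 then (7:Int) else 4)
           = (if m % 2 = 1 then (7:Int) else 4) := by
        rw [hmod]
        rcases Nat.mod_two_eq_zero_or_one m with h | h <;> simp [h]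
      rw [this]; ring
    · have hle : ¬ (1 : Int) < (m : Int) := by exact_mod_cast (by omega : ¬ 1 < m)
      rw [pvLoopB, if_neg hle, pvL_le_one (by omega), mul_zero, add_zero]

lemma pvL_double (c : Nat) :
    pvL (2 * c + 4) = pvL (c + 2) * 10 + 4 ∧ pvL (2 * c + 5) = pvL (c + 2) * 10 + 7 := by
  constructor
  · rw [pvL_step (by omega)]
    have h1 : (2 * c + 4) / 2 = c + 2 := by omega
    have h2 : (2 * c + 4) % 2 = 0 := by omega
    simp [h1, h2]
  · rw [pvL_step (by omega)]
    have h1 : (2 * c + 5) / 2 = c + 2 := by omega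
    have h2 : (2 * c + 5) % 2 = 1 := by omega
    simp [h1, h2]

-- BFS invariant: after c pops the queue holds the lucky numbers of heap indices
-- c+2 … 2c+3, and the loop finally returns pvL (K+1).
lemma pvLoopA_eq (K : Nat) (_hK : 1 ≤ K) (fuel : Nat) : ∀ (c : Nat), c < K → K - c ≤ fuel →
    pvLoopA (K : Int) fuel ((List.range' (c + 2) (c + 2)).map pvL) (c : Int) = pvL (K + 1) := by
  induction fuel with
  | zero => intro c hc hf; omega
  | succ fuel ih =>
    intro c hc hf
    have hq : (List.range' (c + 2) (c + 2)).map pvL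
        = pvL (c + 2) :: (List.range' (c + 3) (c + 1)).map pvL := by
      rw [show c + 2 = (c + 1) + 1 from rfl, List.range'_succ]
      simp
    rw [hq, pvLoopA]
    by_cases heq : (c : Int) + 1 = (K : Int)
    · have : c + 1 = K := by exact_mod_cast heq
      rw [if_pos heq, show K + 1 = c + 2 by omega]
    · rw [if_neg heq]
      have hc1 : c + 1 < K := by
        have : c + 1 ≠ K := fun h => heq (by exact_mod_cast h)
        omega
      have hrange : List.range' (c + 3) (c + 1) ++ [2 * c + 4, 2 * c + 5]
          = List.range' (c + 3) (c + 3) := by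
      -- extend the range by its next two elements
        have h := List.range'_append (s := c + 3) (m := c + 1) (n := 2) (step := 1)
        simpa [List.range', show c + 3 + (c + 1) = 2 * c + 4 by omega,
          show c + 3 + (c + 1) + 1 = 2 * c + 5 by omega, show c + 1 + 2 = c + 3 by omega] using h
      have hmap : (List.range' (c + 3) (c + 1)).map pvL
            ++ [pvL (c + 2) * 10 + 4, pvL (c + 2) * 10 + 7]
          = (List.range' ((c + 1) + 2) ((c + 1) + 2)).map pvL := by
        have hd := pvL_double c
        rw [show (c+1)+2 = c + 3 from rfl, ← hrange]
        simp [hd.1, hd.2]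
      have := ih (c + 1) hc1 (by omega)
      rw [← hmap] at this
      push_cast at this ⊢
      exact this

-- ===== VERDICT (by name: the statement is the Claim_ definition above) =====
theorem find_kth_lucky_number_spec : Claim_equal_find_kth_lucky_number := by
  intro k _
  unfold Spec_find_kth_lucky_number find_kth_lucky_number find_kth_lucky_number_alt
  by_cases hk : k ≤ 0
  · simp [hk]
  · rw [if_neg hk, if_neg hk]
    have hk1 : 1 ≤ k := by omega
    set K : Nat := k.toNat with hKdef
    have hkK : k = (K : Int) := by omega
    have hK1 : 1 ≤ K := by omega
    have hA : pvLoopA (K : Int) K ((List.range' 2 2).map pvL) ((0 : Nat) : Int) = pvL (K + 1) :=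
      pvLoopA_eq K hK1 K 0 (by omega) (by omega)
    have hinit : (List.range' 2 2).map pvL = [4, 7] := by
      have h4 : pvL 2 = 4 := by rw [pvL_step (by omega)]; simp [pvL_le_one]
      have h7 : pvL 3 = 7 := by rw [pvL_step (by omega)]; simp [pvL_le_one]
      simp [List.range'_succ, h4, h7]
    rw [hinit] at hA
    have hB : pvLoopB (K + 1) ((K + 1 : Nat) : Int) 0 1 = 0 + 1 * pvL (K + 1) :=
      pvLoopB_eq (K + 1) (K + 1) 0 1 (le_refl _)
    have hkn : (k + 1).toNat = K + 1 := by omega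
    have hkc : k + 1 = ((K + 1 : Nat) : Int) := by omega
    rw [hkK, hkn, hkc] at *
    simp only [Nat.cast_zero] at hA
    rw [hA, hB]
    ring
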